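-- pv_equiv track=rewrite | github.com/eladsulami/dtw | test-voronoi.py | get_sums
-- ===== SOURCE A (Python) =====
-- def distance(a, b):
--     return abs(a - b)
--
-- def get_sums(line, x, rev):
--     res = []
--     c_sum = 0
--     index_range = range(len(line))
--     index_range = reversed(index_range) if rev else index_range
--     for p in index_range:
--         dist = distance(line[p], x)
--         c_sum += dist
--         if rev:
--             res.insert(0, c_sum)
--         else:
--             res.append(c_sum)
--
--     return res
-- ===== SOURCE B (Python) =====
-- def get_sums(line, x, rev):
--     # Single forward pass: forward prefix sums of |p - x|.  The reversed
--     # variant is derived arithmetically (suffix sum = total - preceding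
--     # prefix), exact on ints -- no reversed traversal, no insert(0).
--     pref = []
--     s = 0
--     for p in line:
--         s += abs(p - x)
--         pref.append(s)
--     if not rev:
--         return pref
--     return [s - (pref[i - 1] if i > 0 else 0) for i in range(len(pref))]
-- ===== Notes on version B (the rewrite author's own statement) =====
-- stated objective: faster
-- what changed: B makes one forward pass building the forward prefix sums and, for rev, derives each suffix sum arithmetically as total minus the preceding prefix (exact on ints), instead of A's reversed index traversal with quadratic insert(0).
import Mathlib
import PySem

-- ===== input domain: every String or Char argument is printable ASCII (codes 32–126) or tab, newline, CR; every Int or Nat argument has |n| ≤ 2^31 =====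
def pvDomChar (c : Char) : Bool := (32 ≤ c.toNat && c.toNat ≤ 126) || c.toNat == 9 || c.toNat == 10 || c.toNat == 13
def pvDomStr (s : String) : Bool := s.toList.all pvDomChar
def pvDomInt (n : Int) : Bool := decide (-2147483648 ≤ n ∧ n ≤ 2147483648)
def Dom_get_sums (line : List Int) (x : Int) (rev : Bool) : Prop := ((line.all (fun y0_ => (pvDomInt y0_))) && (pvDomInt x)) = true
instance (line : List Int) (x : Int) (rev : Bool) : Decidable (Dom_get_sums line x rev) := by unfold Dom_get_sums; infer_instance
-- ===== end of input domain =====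

-- B makes one forward pass (forward prefix sums of |p - x|) and, for rev, derives each
-- suffix sum arithmetically as total minus preceding prefix (exact on ints), replacing
-- A's reversed traversal with insert(0) (objective: faster in the rev case).

-- ===== PORT A =====
def distance (a b : Int) : Int := |a - b|

def get_sums (line : List Int) (x : Int) (rev : Bool) : List Int :=
  let index_range := PySem.List.pyRange 0 (line.length : Int) 1
  let index_range := if rev then index_range.reverse else index_range
  (index_range.foldl (fun (st : List Int × Int) p =>
      let dist := distance (PySem.List.pyGetD line p 0) x
      let c_sum := st.2 + dist
      if rev then (c_sum :: st.1, c_sum) else (st.1 ++ [c_sum], c_sum))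
    ([], 0)).1

-- ===== PORT B =====
def get_sums_alt (line : List Int) (x : Int) (rev : Bool) : List Int :=
  let st := line.foldl (fun (st : List Int × Int) p =>
      (st.1 ++ [st.2 + |p - x|], st.2 + |p - x|)) ([], 0)
  let pref := st.1
  let s := st.2
  if !rev then pref
  else (PySem.List.pyRange 0 (pref.length : Int) 1).map
        (fun i => s - (if 0 < i then PySem.List.pyGetD pref (i - 1) 0 else 0))

-- ===== PRECONDITION & SPEC =====
def Spec_get_sums (line : List Int) (x : Int) (rev : Bool) (out : List Int) : Prop := out = get_sums_alt line x rev
instance (line : List Int) (x : Int) (rev : Bool) (out : List Int) : Decidable (Spec_get_sums line x rev out) := by unfold Spec_get_sums; infer_instance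

-- ===== CLAIM (what is proved, stated in full; the proofs are below) =====
def Claim_equal_get_sums : Prop := ∀ (line : List Int) (x : Int) (rev : Bool), Dom_get_sums line x rev → Spec_get_sums line x rev (get_sums line x rev)

-- ===== LEMMAS AND PROOFS =====

/-- Running prefix sums of `ds` starting from accumulator `s`. -/
def pvScan (s : Int) : List Int → List Int
  | [] => []
  | d :: t => (s + d) :: pvScan (s + d) t

/-- Closed form of the scan: element `i` is `s` plus the sum of the first `i+1` entries. -/
theorem scan_eq_map (ds : List Int) (s : Int) :
    pvScan s ds = (List.range ds.length).map (fun i => s + (ds.take (i+1)).sum) := by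
  induction ds generalizing s with
  | nil => simp [pvScan]
  | cons d t ih =>
      simp [pvScan, ih, List.range_succ_eq_map, List.map_map, Function.comp, add_assoc]

/-- B's append-shaped fold returns the scan and the running total. -/
theorem foldl_append_scan (ds : List Int) (r : List Int) (s : Int) :
    ds.foldl (fun (st : List Int × Int) d => (st.1 ++ [st.2 + d], st.2 + d)) (r, s)
      = (r ++ pvScan s ds, s + ds.sum) := by
  induction ds generalizing r s with
  | nil => simp [pvScan]
  | cons d t ih => simp [List.foldl_cons, pvScan, ih, add_assoc]

/-- A's rev-loop (`insert(0)`, i.e. cons) produces the reversed scan. -/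
theorem foldl_cons_scan (ds : List Int) (r : List Int) (s : Int) :
    (ds.foldl (fun (st : List Int × Int) d => ((st.2 + d) :: st.1, st.2 + d)) (r, s)).1
      = (pvScan s ds).reverse ++ r := by
  induction ds generalizing r s with
  | nil => simp [pvScan]
  | cons d t ih => simp [List.foldl_cons, pvScan, ih]

/-- Reversed scan of the reversed list = suffix sums, written as total minus prefix. -/
theorem scan_reverse (ds : List Int) (s : Int) :
    (pvScan s ds.reverse).reverse
      = (List.range ds.length).map (fun i => s + ds.sum - (ds.take i).sum) := by
  induction ds using List.reverseRecOn generalizing s with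
  | nil => simp [pvScan]
  | append_singleton as a ih =>
      have h1 : (as ++ [a]).reverse = a :: as.reverse := by simp
      rw [h1]
      simp only [pvScan, List.reverse_cons, ih]
      rw [List.length_append, List.length_singleton, List.range_succ, List.map_append]
      congr 1
      · apply List.map_congr_left
        intro i hi
        have hi' : i ≤ as.length := le_of_lt (List.mem_range.mp hi)
        rw [List.take_append_of_le_length hi']
        simp; ring
      · simp; ring

/-- A's index range, mapped through the distance lookup, is the distance table. -/
theorem map_dist_pyRange (line : List Int) (x : Int) :
    (PySem.List.pyRange 0 (line.length : Int) 1).map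
        (fun p => distance (PySem.List.pyGetD line p 0) x)
      = line.map (fun p => |p - x|) := by
  have h := PySem.List.map_pyGetD_pyRange_zero' (xs := line) (d := 0)
  rw [show (fun p => distance (PySem.List.pyGetD line p 0) x)
        = (fun v => distance v x) ∘ (fun p => PySem.List.pyGetD line p 0) from rfl,
    ← List.map_map, h]
  simp [distance]

-- ===== VERDICT (by name: the statement is the Claim_ definition above) =====
theorem get_sums_spec : Claim_equal_get_sums := by
  intro line x rev _
  unfold Spec_get_sums get_sums get_sums_alt
  set ds := line.map (fun p => |p - x|) with hds
  have hfold := foldl_append_scan ds [] 0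
  have hB : line.foldl (fun (st : List Int × Int) p =>
        (st.1 ++ [st.2 + |p - x|], st.2 + |p - x|)) ([], 0)
      = (pvScan 0 ds, ds.sum) := by
    rw [← List.foldl_map (f := fun p => |p - x|)
        (g := fun (st : List Int × Int) d => (st.1 ++ [st.2 + d], st.2 + d)), hfold]
    simp
  cases rev with
  | false =>
      simp only [Bool.false_eq_true, if_false, Bool.not_false, if_true, hB]
      rw [← List.foldl_map (f := fun p => distance (PySem.List.pyGetD line p 0) x)
          (g := fun (st : List Int × Int) d => (st.1 ++ [st.2 + d], st.2 + d)),
        map_dist_pyRange, ← hds, hfold]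
      simp
  | true =>
      simp only [if_pos, Bool.not_true, Bool.false_eq_true, if_false, hB]
      -- A's side: reversed scan of reversed distances
      rw [← List.foldl_map (f := fun p => distance (PySem.List.pyGetD line p 0) x)
          (g := fun (st : List Int × Int) d => ((st.2 + d) :: st.1, st.2 + d)),
        List.map_reverse, map_dist_pyRange, ← hds, foldl_cons_scan, List.append_nil,
        scan_reverse]
      -- B's side: arithmetic over the forward scan
      have hlen : (pvScan 0 ds).length = ds.length := by
        rw [scan_eq_map]; simp
      rw [hlen, PySem.List.pyRange_zero_nat, List.map_map]
      apply List.map_congr_left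
      intro i hi
      have hi' : i < ds.length := List.mem_range.mp hi
      simp only [Function.comp]
      cases i with
      | zero => simp
      | succ j =>
          have hpos : (0 : Int) < ((j + 1 : Nat) : Int) := by positivity
          rw [if_pos hpos]
          have : ((j + 1 : Nat) : Int) - 1 = ((j : Nat) : Int) := by push_cast; ring
          rw [this, PySem.List.pyGetD_natCast]
          rw [scan_eq_map]
          have hj : j < ds.length := by omega
          rw [List.getD_eq_getElem _ _ (by simpa using hj)]
          simp
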